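/-
  GENERATED by c/gen_fields.py from LAYOUT_STRUCTS.txt (sha256 fcd69494374499f9694f3c8c5fa23a4d09d18a5e7e0235cee2f5194eeebe9600). DO NOT EDIT:
      c/gen_fields.py c/LAYOUT_STRUCTS.txt > Vorbis/Fields/Offsets.lean
  What the names mean: the header of Vorbis/Fields.lean.
  Structs: stb_vorbis_alloc (16), stb_vorbis (1808), stb_vorbis_info (24), stb_vorbis_comment (24), Codebook (2120), Floor0 (26), Floor1 (1596), Floor (1596), Residue (32), MappingChannel (3), Mapping (56), Mode (6), ProbedPage (12), stbv__floor_ordering (4), bits64 (8), asan_global (64).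
  Renamed (Lean keywords): Residue.end -> Residue.end_.
-/
import Vorbis.Fields.Core
namespace Vorbis
open X86 X86.User

/-! ### The offsets (`simp only [voff]` turns them into numerals) -/

namespace Off

/-! #### `struct stb_vorbis_alloc`, 16 bytes -/
/-- `sizeof(stb_vorbis_alloc)` -/
@[voff] def sizeof.stb_vorbis_alloc : Nat := 16
/-- `char * stb_vorbis_alloc.alloc_buffer`: offset 0, 8 bytes -/
@[voff] def stb_vorbis_alloc.alloc_buffer : Nat := 0
/-- `int stb_vorbis_alloc.alloc_buffer_length_in_bytes`: offset 8, 4 bytes -/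
@[voff] def stb_vorbis_alloc.alloc_buffer_length_in_bytes : Nat := 8

/-! #### `struct stb_vorbis`, 1808 bytes -/
/-- `sizeof(stb_vorbis)` -/
@[voff] def sizeof.stb_vorbis : Nat := 1808
/-- `unsigned int stb_vorbis.sample_rate`: offset 0, 4 bytes -/
@[voff] def stb_vorbis.sample_rate : Nat := 0
/-- `int stb_vorbis.channels`: offset 4, 4 bytes -/
@[voff] def stb_vorbis.channels : Nat := 4
/-- `unsigned int stb_vorbis.setup_memory_required`: offset 8, 4 bytes -/
@[voff] def stb_vorbis.setup_memory_required : Nat := 8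
/-- `unsigned int stb_vorbis.temp_memory_required`: offset 12, 4 bytes -/
@[voff] def stb_vorbis.temp_memory_required : Nat := 12
/-- `unsigned int stb_vorbis.setup_temp_memory_required`: offset 16, 4 bytes -/
@[voff] def stb_vorbis.setup_temp_memory_required : Nat := 16
/-- `char * stb_vorbis.vendor`: offset 24, 8 bytes -/
@[voff] def stb_vorbis.vendor : Nat := 24
/-- `int stb_vorbis.comment_list_length`: offset 32, 4 bytes -/
@[voff] def stb_vorbis.comment_list_length : Nat := 32
/-- `char * * stb_vorbis.comment_list`: offset 40, 8 bytes -/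
@[voff] def stb_vorbis.comment_list : Nat := 40
/-- `uint8 * stb_vorbis.stream`: offset 48, 8 bytes -/
@[voff] def stb_vorbis.stream : Nat := 48
/-- `uint8 * stb_vorbis.stream_start`: offset 56, 8 bytes -/
@[voff] def stb_vorbis.stream_start : Nat := 56
/-- `uint8 * stb_vorbis.stream_end`: offset 64, 8 bytes -/
@[voff] def stb_vorbis.stream_end : Nat := 64
/-- `uint32 stb_vorbis.stream_len`: offset 72, 4 bytes -/
@[voff] def stb_vorbis.stream_len : Nat := 72
/-- `uint8 stb_vorbis.push_mode`: offset 76, 1 bytes -/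
@[voff] def stb_vorbis.push_mode : Nat := 76
/-- `uint32 stb_vorbis.first_audio_page_offset`: offset 80, 4 bytes -/
@[voff] def stb_vorbis.first_audio_page_offset : Nat := 80
/-- `ProbedPage stb_vorbis.p_first`: offset 84, 12 bytes -/
@[voff] def stb_vorbis.p_first : Nat := 84
/-- `uint32 stb_vorbis.p_first.page_start`: offset 84, 4 bytes -/
@[voff] def stb_vorbis.p_first.page_start : Nat := 84
/-- `uint32 stb_vorbis.p_first.page_end`: offset 88, 4 bytes -/
@[voff] def stb_vorbis.p_first.page_end : Nat := 88
/-- `uint32 stb_vorbis.p_first.last_decoded_sample`: offset 92, 4 bytes -/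
@[voff] def stb_vorbis.p_first.last_decoded_sample : Nat := 92
/-- `ProbedPage stb_vorbis.p_last`: offset 96, 12 bytes -/
@[voff] def stb_vorbis.p_last : Nat := 96
/-- `uint32 stb_vorbis.p_last.page_start`: offset 96, 4 bytes -/
@[voff] def stb_vorbis.p_last.page_start : Nat := 96
/-- `uint32 stb_vorbis.p_last.page_end`: offset 100, 4 bytes -/
@[voff] def stb_vorbis.p_last.page_end : Nat := 100
/-- `uint32 stb_vorbis.p_last.last_decoded_sample`: offset 104, 4 bytes -/
@[voff] def stb_vorbis.p_last.last_decoded_sample : Nat := 104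
/-- `stb_vorbis_alloc stb_vorbis.alloc`: offset 112, 16 bytes -/
@[voff] def stb_vorbis.alloc : Nat := 112
/-- `char * stb_vorbis.alloc.alloc_buffer`: offset 112, 8 bytes -/
@[voff] def stb_vorbis.alloc.alloc_buffer : Nat := 112
/-- `int stb_vorbis.alloc.alloc_buffer_length_in_bytes`: offset 120, 4 bytes -/
@[voff] def stb_vorbis.alloc.alloc_buffer_length_in_bytes : Nat := 120
/-- `int stb_vorbis.setup_offset`: offset 128, 4 bytes -/
@[voff] def stb_vorbis.setup_offset : Nat := 128
/-- `int stb_vorbis.temp_offset`: offset 132, 4 bytes -/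
@[voff] def stb_vorbis.temp_offset : Nat := 132
/-- `int stb_vorbis.eof`: offset 136, 4 bytes -/
@[voff] def stb_vorbis.eof : Nat := 136
/-- `enum STBVorbisError stb_vorbis.error`: offset 140, 4 bytes -/
@[voff] def stb_vorbis.error : Nat := 140
/-- `int stb_vorbis.blocksize[2]`: offset 144, 8 bytes -/
@[voff] def stb_vorbis.blocksize : Nat := 144
/-- `stb_vorbis.blocksize[2]`: number of elements (first index) -/
@[voff] def stb_vorbis.blocksize.count : Nat := 2
/-- `stb_vorbis.blocksize[2]`: bytes of one element -/
@[voff] def stb_vorbis.blocksize.elem : Nat := 4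
/-- `int stb_vorbis.blocksize_0`: offset 152, 4 bytes -/
@[voff] def stb_vorbis.blocksize_0 : Nat := 152
/-- `int stb_vorbis.blocksize_1`: offset 156, 4 bytes -/
@[voff] def stb_vorbis.blocksize_1 : Nat := 156
/-- `int stb_vorbis.codebook_count`: offset 160, 4 bytes -/
@[voff] def stb_vorbis.codebook_count : Nat := 160
/-- `Codebook * stb_vorbis.codebooks`: offset 168, 8 bytes -/
@[voff] def stb_vorbis.codebooks : Nat := 168
/-- `int stb_vorbis.floor_count`: offset 176, 4 bytes -/
@[voff] def stb_vorbis.floor_count : Nat := 176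
/-- `uint16 stb_vorbis.floor_types[64]`: offset 180, 128 bytes -/
@[voff] def stb_vorbis.floor_types : Nat := 180
/-- `stb_vorbis.floor_types[64]`: number of elements (first index) -/
@[voff] def stb_vorbis.floor_types.count : Nat := 64
/-- `stb_vorbis.floor_types[64]`: bytes of one element -/
@[voff] def stb_vorbis.floor_types.elem : Nat := 2
/-- `Floor * stb_vorbis.floor_config`: offset 312, 8 bytes -/
@[voff] def stb_vorbis.floor_config : Nat := 312
/-- `int stb_vorbis.residue_count`: offset 320, 4 bytes -/
@[voff] def stb_vorbis.residue_count : Nat := 320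
/-- `uint16 stb_vorbis.residue_types[64]`: offset 324, 128 bytes -/
@[voff] def stb_vorbis.residue_types : Nat := 324
/-- `stb_vorbis.residue_types[64]`: number of elements (first index) -/
@[voff] def stb_vorbis.residue_types.count : Nat := 64
/-- `stb_vorbis.residue_types[64]`: bytes of one element -/
@[voff] def stb_vorbis.residue_types.elem : Nat := 2
/-- `Residue * stb_vorbis.residue_config`: offset 456, 8 bytes -/
@[voff] def stb_vorbis.residue_config : Nat := 456
/-- `int stb_vorbis.mapping_count`: offset 464, 4 bytes -/
@[voff] def stb_vorbis.mapping_count : Nat := 464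
/-- `Mapping * stb_vorbis.mapping`: offset 472, 8 bytes -/
@[voff] def stb_vorbis.mapping : Nat := 472
/-- `int stb_vorbis.mode_count`: offset 480, 4 bytes -/
@[voff] def stb_vorbis.mode_count : Nat := 480
/-- `Mode stb_vorbis.mode_config[64]`: offset 484, 384 bytes -/
@[voff] def stb_vorbis.mode_config : Nat := 484
/-- `stb_vorbis.mode_config[64]`: number of elements (first index) -/
@[voff] def stb_vorbis.mode_config.count : Nat := 64
/-- `stb_vorbis.mode_config[64]`: bytes of one element -/
@[voff] def stb_vorbis.mode_config.elem : Nat := 6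
/-- `uint32 stb_vorbis.total_samples`: offset 868, 4 bytes -/
@[voff] def stb_vorbis.total_samples : Nat := 868
/-- `float * stb_vorbis.channel_buffers[16]`: offset 872, 128 bytes -/
@[voff] def stb_vorbis.channel_buffers : Nat := 872
/-- `stb_vorbis.channel_buffers[16]`: number of elements (first index) -/
@[voff] def stb_vorbis.channel_buffers.count : Nat := 16
/-- `stb_vorbis.channel_buffers[16]`: bytes of one element -/
@[voff] def stb_vorbis.channel_buffers.elem : Nat := 8
/-- `float * stb_vorbis.outputs[16]`: offset 1000, 128 bytes -/
@[voff] def stb_vorbis.outputs : Nat := 1000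
/-- `stb_vorbis.outputs[16]`: number of elements (first index) -/
@[voff] def stb_vorbis.outputs.count : Nat := 16
/-- `stb_vorbis.outputs[16]`: bytes of one element -/
@[voff] def stb_vorbis.outputs.elem : Nat := 8
/-- `float * stb_vorbis.previous_window[16]`: offset 1128, 128 bytes -/
@[voff] def stb_vorbis.previous_window : Nat := 1128
/-- `stb_vorbis.previous_window[16]`: number of elements (first index) -/
@[voff] def stb_vorbis.previous_window.count : Nat := 16
/-- `stb_vorbis.previous_window[16]`: bytes of one element -/
@[voff] def stb_vorbis.previous_window.elem : Nat := 8
/-- `int stb_vorbis.previous_length`: offset 1256, 4 bytes -/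
@[voff] def stb_vorbis.previous_length : Nat := 1256
/-- `int16 * stb_vorbis.finalY[16]`: offset 1264, 128 bytes -/
@[voff] def stb_vorbis.finalY : Nat := 1264
/-- `stb_vorbis.finalY[16]`: number of elements (first index) -/
@[voff] def stb_vorbis.finalY.count : Nat := 16
/-- `stb_vorbis.finalY[16]`: bytes of one element -/
@[voff] def stb_vorbis.finalY.elem : Nat := 8
/-- `uint32 stb_vorbis.current_loc`: offset 1392, 4 bytes -/
@[voff] def stb_vorbis.current_loc : Nat := 1392
/-- `int stb_vorbis.current_loc_valid`: offset 1396, 4 bytes -/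
@[voff] def stb_vorbis.current_loc_valid : Nat := 1396
/-- `float * stb_vorbis.A[2]`: offset 1400, 16 bytes -/
@[voff] def stb_vorbis.A : Nat := 1400
/-- `stb_vorbis.A[2]`: number of elements (first index) -/
@[voff] def stb_vorbis.A.count : Nat := 2
/-- `stb_vorbis.A[2]`: bytes of one element -/
@[voff] def stb_vorbis.A.elem : Nat := 8
/-- `float * stb_vorbis.B[2]`: offset 1416, 16 bytes -/
@[voff] def stb_vorbis.B : Nat := 1416
/-- `stb_vorbis.B[2]`: number of elements (first index) -/
@[voff] def stb_vorbis.B.count : Nat := 2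
/-- `stb_vorbis.B[2]`: bytes of one element -/
@[voff] def stb_vorbis.B.elem : Nat := 8
/-- `float * stb_vorbis.C[2]`: offset 1432, 16 bytes -/
@[voff] def stb_vorbis.C : Nat := 1432
/-- `stb_vorbis.C[2]`: number of elements (first index) -/
@[voff] def stb_vorbis.C.count : Nat := 2
/-- `stb_vorbis.C[2]`: bytes of one element -/
@[voff] def stb_vorbis.C.elem : Nat := 8
/-- `float * stb_vorbis.window[2]`: offset 1448, 16 bytes -/
@[voff] def stb_vorbis.window : Nat := 1448
/-- `stb_vorbis.window[2]`: number of elements (first index) -/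
@[voff] def stb_vorbis.window.count : Nat := 2
/-- `stb_vorbis.window[2]`: bytes of one element -/
@[voff] def stb_vorbis.window.elem : Nat := 8
/-- `uint16 * stb_vorbis.bit_reverse[2]`: offset 1464, 16 bytes -/
@[voff] def stb_vorbis.bit_reverse : Nat := 1464
/-- `stb_vorbis.bit_reverse[2]`: number of elements (first index) -/
@[voff] def stb_vorbis.bit_reverse.count : Nat := 2
/-- `stb_vorbis.bit_reverse[2]`: bytes of one element -/
@[voff] def stb_vorbis.bit_reverse.elem : Nat := 8
/-- `uint32 stb_vorbis.serial`: offset 1480, 4 bytes -/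
@[voff] def stb_vorbis.serial : Nat := 1480
/-- `int stb_vorbis.last_page`: offset 1484, 4 bytes -/
@[voff] def stb_vorbis.last_page : Nat := 1484
/-- `int stb_vorbis.segment_count`: offset 1488, 4 bytes -/
@[voff] def stb_vorbis.segment_count : Nat := 1488
/-- `uint8 stb_vorbis.segments[255]`: offset 1492, 255 bytes -/
@[voff] def stb_vorbis.segments : Nat := 1492
/-- `stb_vorbis.segments[255]`: number of elements (first index) -/
@[voff] def stb_vorbis.segments.count : Nat := 255
/-- `stb_vorbis.segments[255]`: bytes of one element -/
@[voff] def stb_vorbis.segments.elem : Nat := 1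
/-- `uint8 stb_vorbis.page_flag`: offset 1747, 1 bytes -/
@[voff] def stb_vorbis.page_flag : Nat := 1747
/-- `uint8 stb_vorbis.bytes_in_seg`: offset 1748, 1 bytes -/
@[voff] def stb_vorbis.bytes_in_seg : Nat := 1748
/-- `uint8 stb_vorbis.first_decode`: offset 1749, 1 bytes -/
@[voff] def stb_vorbis.first_decode : Nat := 1749
/-- `int stb_vorbis.next_seg`: offset 1752, 4 bytes -/
@[voff] def stb_vorbis.next_seg : Nat := 1752
/-- `int stb_vorbis.last_seg`: offset 1756, 4 bytes -/
@[voff] def stb_vorbis.last_seg : Nat := 1756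
/-- `int stb_vorbis.last_seg_which`: offset 1760, 4 bytes -/
@[voff] def stb_vorbis.last_seg_which : Nat := 1760
/-- `uint32 stb_vorbis.acc`: offset 1764, 4 bytes -/
@[voff] def stb_vorbis.acc : Nat := 1764
/-- `int stb_vorbis.valid_bits`: offset 1768, 4 bytes -/
@[voff] def stb_vorbis.valid_bits : Nat := 1768
/-- `int stb_vorbis.packet_bytes`: offset 1772, 4 bytes -/
@[voff] def stb_vorbis.packet_bytes : Nat := 1772
/-- `int stb_vorbis.end_seg_with_known_loc`: offset 1776, 4 bytes -/
@[voff] def stb_vorbis.end_seg_with_known_loc : Nat := 1776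
/-- `uint32 stb_vorbis.known_loc_for_packet`: offset 1780, 4 bytes -/
@[voff] def stb_vorbis.known_loc_for_packet : Nat := 1780
/-- `int stb_vorbis.discard_samples_deferred`: offset 1784, 4 bytes -/
@[voff] def stb_vorbis.discard_samples_deferred : Nat := 1784
/-- `uint32 stb_vorbis.samples_output`: offset 1788, 4 bytes -/
@[voff] def stb_vorbis.samples_output : Nat := 1788
/-- `int stb_vorbis.page_crc_tests`: offset 1792, 4 bytes -/
@[voff] def stb_vorbis.page_crc_tests : Nat := 1792
/-- `int stb_vorbis.channel_buffer_start`: offset 1796, 4 bytes -/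
@[voff] def stb_vorbis.channel_buffer_start : Nat := 1796
/-- `int stb_vorbis.channel_buffer_end`: offset 1800, 4 bytes -/
@[voff] def stb_vorbis.channel_buffer_end : Nat := 1800

/-! #### `struct stb_vorbis_info`, 24 bytes -/
/-- `sizeof(stb_vorbis_info)` -/
@[voff] def sizeof.stb_vorbis_info : Nat := 24
/-- `unsigned int stb_vorbis_info.sample_rate`: offset 0, 4 bytes -/
@[voff] def stb_vorbis_info.sample_rate : Nat := 0
/-- `int stb_vorbis_info.channels`: offset 4, 4 bytes -/
@[voff] def stb_vorbis_info.channels : Nat := 4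
/-- `unsigned int stb_vorbis_info.setup_memory_required`: offset 8, 4 bytes -/
@[voff] def stb_vorbis_info.setup_memory_required : Nat := 8
/-- `unsigned int stb_vorbis_info.setup_temp_memory_required`: offset 12, 4 bytes -/
@[voff] def stb_vorbis_info.setup_temp_memory_required : Nat := 12
/-- `unsigned int stb_vorbis_info.temp_memory_required`: offset 16, 4 bytes -/
@[voff] def stb_vorbis_info.temp_memory_required : Nat := 16
/-- `int stb_vorbis_info.max_frame_size`: offset 20, 4 bytes -/
@[voff] def stb_vorbis_info.max_frame_size : Nat := 20

/-! #### `struct stb_vorbis_comment`, 24 bytes -/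
/-- `sizeof(stb_vorbis_comment)` -/
@[voff] def sizeof.stb_vorbis_comment : Nat := 24
/-- `char * stb_vorbis_comment.vendor`: offset 0, 8 bytes -/
@[voff] def stb_vorbis_comment.vendor : Nat := 0
/-- `int stb_vorbis_comment.comment_list_length`: offset 8, 4 bytes -/
@[voff] def stb_vorbis_comment.comment_list_length : Nat := 8
/-- `char * * stb_vorbis_comment.comment_list`: offset 16, 8 bytes -/
@[voff] def stb_vorbis_comment.comment_list : Nat := 16

/-! #### `struct Codebook`, 2120 bytes -/
/-- `sizeof(Codebook)` -/
@[voff] def sizeof.Codebook : Nat := 2120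
/-- `int Codebook.dimensions`: offset 0, 4 bytes -/
@[voff] def Codebook.dimensions : Nat := 0
/-- `int Codebook.entries`: offset 4, 4 bytes -/
@[voff] def Codebook.entries : Nat := 4
/-- `uint8 * Codebook.codeword_lengths`: offset 8, 8 bytes -/
@[voff] def Codebook.codeword_lengths : Nat := 8
/-- `float Codebook.minimum_value`: offset 16, 4 bytes -/
@[voff] def Codebook.minimum_value : Nat := 16
/-- `float Codebook.delta_value`: offset 20, 4 bytes -/
@[voff] def Codebook.delta_value : Nat := 20
/-- `uint8 Codebook.value_bits`: offset 24, 1 bytes -/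
@[voff] def Codebook.value_bits : Nat := 24
/-- `uint8 Codebook.lookup_type`: offset 25, 1 bytes -/
@[voff] def Codebook.lookup_type : Nat := 25
/-- `uint8 Codebook.sequence_p`: offset 26, 1 bytes -/
@[voff] def Codebook.sequence_p : Nat := 26
/-- `uint8 Codebook.sparse`: offset 27, 1 bytes -/
@[voff] def Codebook.sparse : Nat := 27
/-- `uint32 Codebook.lookup_values`: offset 28, 4 bytes -/
@[voff] def Codebook.lookup_values : Nat := 28
/-- `codetype * Codebook.multiplicands`: offset 32, 8 bytes -/
@[voff] def Codebook.multiplicands : Nat := 32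
/-- `uint32 * Codebook.codewords`: offset 40, 8 bytes -/
@[voff] def Codebook.codewords : Nat := 40
/-- `int16 Codebook.fast_huffman[1024]`: offset 48, 2048 bytes -/
@[voff] def Codebook.fast_huffman : Nat := 48
/-- `Codebook.fast_huffman[1024]`: number of elements (first index) -/
@[voff] def Codebook.fast_huffman.count : Nat := 1024
/-- `Codebook.fast_huffman[1024]`: bytes of one element -/
@[voff] def Codebook.fast_huffman.elem : Nat := 2
/-- `uint32 * Codebook.sorted_codewords`: offset 2096, 8 bytes -/
@[voff] def Codebook.sorted_codewords : Nat := 2096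
/-- `int * Codebook.sorted_values`: offset 2104, 8 bytes -/
@[voff] def Codebook.sorted_values : Nat := 2104
/-- `int Codebook.sorted_entries`: offset 2112, 4 bytes -/
@[voff] def Codebook.sorted_entries : Nat := 2112

/-! #### `struct Floor0`, 26 bytes -/
/-- `sizeof(Floor0)` -/
@[voff] def sizeof.Floor0 : Nat := 26
/-- `uint8 Floor0.order`: offset 0, 1 bytes -/
@[voff] def Floor0.order : Nat := 0
/-- `uint16 Floor0.rate`: offset 2, 2 bytes -/
@[voff] def Floor0.rate : Nat := 2
/-- `uint16 Floor0.bark_map_size`: offset 4, 2 bytes -/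
@[voff] def Floor0.bark_map_size : Nat := 4
/-- `uint8 Floor0.amplitude_bits`: offset 6, 1 bytes -/
@[voff] def Floor0.amplitude_bits : Nat := 6
/-- `uint8 Floor0.amplitude_offset`: offset 7, 1 bytes -/
@[voff] def Floor0.amplitude_offset : Nat := 7
/-- `uint8 Floor0.number_of_books`: offset 8, 1 bytes -/
@[voff] def Floor0.number_of_books : Nat := 8
/-- `uint8 Floor0.book_list[16]`: offset 9, 16 bytes -/
@[voff] def Floor0.book_list : Nat := 9
/-- `Floor0.book_list[16]`: number of elements (first index) -/
@[voff] def Floor0.book_list.count : Nat := 16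
/-- `Floor0.book_list[16]`: bytes of one element -/
@[voff] def Floor0.book_list.elem : Nat := 1

/-! #### `struct Floor1`, 1596 bytes -/
/-- `sizeof(Floor1)` -/
@[voff] def sizeof.Floor1 : Nat := 1596
/-- `uint8 Floor1.partitions`: offset 0, 1 bytes -/
@[voff] def Floor1.partitions : Nat := 0
/-- `uint8 Floor1.partition_class_list[32]`: offset 1, 32 bytes -/
@[voff] def Floor1.partition_class_list : Nat := 1
/-- `Floor1.partition_class_list[32]`: number of elements (first index) -/
@[voff] def Floor1.partition_class_list.count : Nat := 32
/-- `Floor1.partition_class_list[32]`: bytes of one element -/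
@[voff] def Floor1.partition_class_list.elem : Nat := 1
/-- `uint8 Floor1.class_dimensions[16]`: offset 33, 16 bytes -/
@[voff] def Floor1.class_dimensions : Nat := 33
/-- `Floor1.class_dimensions[16]`: number of elements (first index) -/
@[voff] def Floor1.class_dimensions.count : Nat := 16
/-- `Floor1.class_dimensions[16]`: bytes of one element -/
@[voff] def Floor1.class_dimensions.elem : Nat := 1
/-- `uint8 Floor1.class_subclasses[16]`: offset 49, 16 bytes -/
@[voff] def Floor1.class_subclasses : Nat := 49
/-- `Floor1.class_subclasses[16]`: number of elements (first index) -/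
@[voff] def Floor1.class_subclasses.count : Nat := 16
/-- `Floor1.class_subclasses[16]`: bytes of one element -/
@[voff] def Floor1.class_subclasses.elem : Nat := 1
/-- `uint8 Floor1.class_masterbooks[16]`: offset 65, 16 bytes -/
@[voff] def Floor1.class_masterbooks : Nat := 65
/-- `Floor1.class_masterbooks[16]`: number of elements (first index) -/
@[voff] def Floor1.class_masterbooks.count : Nat := 16
/-- `Floor1.class_masterbooks[16]`: bytes of one element -/
@[voff] def Floor1.class_masterbooks.elem : Nat := 1
/-- `int16 Floor1.subclass_books[16][8]`: offset 82, 256 bytes -/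
@[voff] def Floor1.subclass_books : Nat := 82
/-- `Floor1.subclass_books[16][8]`: number of elements (first index) -/
@[voff] def Floor1.subclass_books.count : Nat := 16
/-- `Floor1.subclass_books[16][8]`: number of elements of a row (second index) -/
@[voff] def Floor1.subclass_books.count2 : Nat := 8
/-- `Floor1.subclass_books[16][8]`: bytes of one element -/
@[voff] def Floor1.subclass_books.elem : Nat := 2
/-- `uint16 Floor1.Xlist[250]`: offset 338, 500 bytes -/
@[voff] def Floor1.Xlist : Nat := 338
/-- `Floor1.Xlist[250]`: number of elements (first index) -/
@[voff] def Floor1.Xlist.count : Nat := 250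
/-- `Floor1.Xlist[250]`: bytes of one element -/
@[voff] def Floor1.Xlist.elem : Nat := 2
/-- `uint8 Floor1.sorted_order[250]`: offset 838, 250 bytes -/
@[voff] def Floor1.sorted_order : Nat := 838
/-- `Floor1.sorted_order[250]`: number of elements (first index) -/
@[voff] def Floor1.sorted_order.count : Nat := 250
/-- `Floor1.sorted_order[250]`: bytes of one element -/
@[voff] def Floor1.sorted_order.elem : Nat := 1
/-- `uint8 Floor1.neighbors[250][2]`: offset 1088, 500 bytes -/
@[voff] def Floor1.neighbors : Nat := 1088
/-- `Floor1.neighbors[250][2]`: number of elements (first index) -/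
@[voff] def Floor1.neighbors.count : Nat := 250
/-- `Floor1.neighbors[250][2]`: number of elements of a row (second index) -/
@[voff] def Floor1.neighbors.count2 : Nat := 2
/-- `Floor1.neighbors[250][2]`: bytes of one element -/
@[voff] def Floor1.neighbors.elem : Nat := 1
/-- `uint8 Floor1.floor1_multiplier`: offset 1588, 1 bytes -/
@[voff] def Floor1.floor1_multiplier : Nat := 1588
/-- `uint8 Floor1.rangebits`: offset 1589, 1 bytes -/
@[voff] def Floor1.rangebits : Nat := 1589
/-- `int Floor1.values`: offset 1592, 4 bytes -/
@[voff] def Floor1.values : Nat := 1592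

/-! #### `union Floor`, 1596 bytes -/
/-- `sizeof(Floor)` -/
@[voff] def sizeof.Floor : Nat := 1596
/-- `Floor0 Floor.floor0`: offset 0, 26 bytes -/
@[voff] def Floor.floor0 : Nat := 0
/-- `uint8 Floor.floor0.order`: offset 0, 1 bytes -/
@[voff] def Floor.floor0.order : Nat := 0
/-- `uint16 Floor.floor0.rate`: offset 2, 2 bytes -/
@[voff] def Floor.floor0.rate : Nat := 2
/-- `uint16 Floor.floor0.bark_map_size`: offset 4, 2 bytes -/
@[voff] def Floor.floor0.bark_map_size : Nat := 4
/-- `uint8 Floor.floor0.amplitude_bits`: offset 6, 1 bytes -/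
@[voff] def Floor.floor0.amplitude_bits : Nat := 6
/-- `uint8 Floor.floor0.amplitude_offset`: offset 7, 1 bytes -/
@[voff] def Floor.floor0.amplitude_offset : Nat := 7
/-- `uint8 Floor.floor0.number_of_books`: offset 8, 1 bytes -/
@[voff] def Floor.floor0.number_of_books : Nat := 8
/-- `uint8 Floor.floor0.book_list[16]`: offset 9, 16 bytes -/
@[voff] def Floor.floor0.book_list : Nat := 9
/-- `Floor.floor0.book_list[16]`: number of elements (first index) -/
@[voff] def Floor.floor0.book_list.count : Nat := 16
/-- `Floor.floor0.book_list[16]`: bytes of one element -/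
@[voff] def Floor.floor0.book_list.elem : Nat := 1
/-- `Floor1 Floor.floor1`: offset 0, 1596 bytes -/
@[voff] def Floor.floor1 : Nat := 0
/-- `uint8 Floor.floor1.partitions`: offset 0, 1 bytes -/
@[voff] def Floor.floor1.partitions : Nat := 0
/-- `uint8 Floor.floor1.partition_class_list[32]`: offset 1, 32 bytes -/
@[voff] def Floor.floor1.partition_class_list : Nat := 1
/-- `Floor.floor1.partition_class_list[32]`: number of elements (first index) -/
@[voff] def Floor.floor1.partition_class_list.count : Nat := 32
/-- `Floor.floor1.partition_class_list[32]`: bytes of one element -/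
@[voff] def Floor.floor1.partition_class_list.elem : Nat := 1
/-- `uint8 Floor.floor1.class_dimensions[16]`: offset 33, 16 bytes -/
@[voff] def Floor.floor1.class_dimensions : Nat := 33
/-- `Floor.floor1.class_dimensions[16]`: number of elements (first index) -/
@[voff] def Floor.floor1.class_dimensions.count : Nat := 16
/-- `Floor.floor1.class_dimensions[16]`: bytes of one element -/
@[voff] def Floor.floor1.class_dimensions.elem : Nat := 1
/-- `uint8 Floor.floor1.class_subclasses[16]`: offset 49, 16 bytes -/
@[voff] def Floor.floor1.class_subclasses : Nat := 49
/-- `Floor.floor1.class_subclasses[16]`: number of elements (first index) -/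
@[voff] def Floor.floor1.class_subclasses.count : Nat := 16
/-- `Floor.floor1.class_subclasses[16]`: bytes of one element -/
@[voff] def Floor.floor1.class_subclasses.elem : Nat := 1
/-- `uint8 Floor.floor1.class_masterbooks[16]`: offset 65, 16 bytes -/
@[voff] def Floor.floor1.class_masterbooks : Nat := 65
/-- `Floor.floor1.class_masterbooks[16]`: number of elements (first index) -/
@[voff] def Floor.floor1.class_masterbooks.count : Nat := 16
/-- `Floor.floor1.class_masterbooks[16]`: bytes of one element -/
@[voff] def Floor.floor1.class_masterbooks.elem : Nat := 1
/-- `int16 Floor.floor1.subclass_books[16][8]`: offset 82, 256 bytes -/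
@[voff] def Floor.floor1.subclass_books : Nat := 82
/-- `Floor.floor1.subclass_books[16][8]`: number of elements (first index) -/
@[voff] def Floor.floor1.subclass_books.count : Nat := 16
/-- `Floor.floor1.subclass_books[16][8]`: number of elements of a row (second index) -/
@[voff] def Floor.floor1.subclass_books.count2 : Nat := 8
/-- `Floor.floor1.subclass_books[16][8]`: bytes of one element -/
@[voff] def Floor.floor1.subclass_books.elem : Nat := 2
/-- `uint16 Floor.floor1.Xlist[250]`: offset 338, 500 bytes -/
@[voff] def Floor.floor1.Xlist : Nat := 338
/-- `Floor.floor1.Xlist[250]`: number of elements (first index) -/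
@[voff] def Floor.floor1.Xlist.count : Nat := 250
/-- `Floor.floor1.Xlist[250]`: bytes of one element -/
@[voff] def Floor.floor1.Xlist.elem : Nat := 2
/-- `uint8 Floor.floor1.sorted_order[250]`: offset 838, 250 bytes -/
@[voff] def Floor.floor1.sorted_order : Nat := 838
/-- `Floor.floor1.sorted_order[250]`: number of elements (first index) -/
@[voff] def Floor.floor1.sorted_order.count : Nat := 250
/-- `Floor.floor1.sorted_order[250]`: bytes of one element -/
@[voff] def Floor.floor1.sorted_order.elem : Nat := 1
/-- `uint8 Floor.floor1.neighbors[250][2]`: offset 1088, 500 bytes -/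
@[voff] def Floor.floor1.neighbors : Nat := 1088
/-- `Floor.floor1.neighbors[250][2]`: number of elements (first index) -/
@[voff] def Floor.floor1.neighbors.count : Nat := 250
/-- `Floor.floor1.neighbors[250][2]`: number of elements of a row (second index) -/
@[voff] def Floor.floor1.neighbors.count2 : Nat := 2
/-- `Floor.floor1.neighbors[250][2]`: bytes of one element -/
@[voff] def Floor.floor1.neighbors.elem : Nat := 1
/-- `uint8 Floor.floor1.floor1_multiplier`: offset 1588, 1 bytes -/
@[voff] def Floor.floor1.floor1_multiplier : Nat := 1588
/-- `uint8 Floor.floor1.rangebits`: offset 1589, 1 bytes -/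
@[voff] def Floor.floor1.rangebits : Nat := 1589
/-- `int Floor.floor1.values`: offset 1592, 4 bytes -/
@[voff] def Floor.floor1.values : Nat := 1592

/-! #### `struct Residue`, 32 bytes -/
/-- `sizeof(Residue)` -/
@[voff] def sizeof.Residue : Nat := 32
/-- `uint32 Residue.begin`: offset 0, 4 bytes -/
@[voff] def Residue.begin : Nat := 0
/-- `uint32 Residue.end`: offset 4, 4 bytes -/
@[voff] def Residue.end_ : Nat := 4
/-- `uint32 Residue.part_size`: offset 8, 4 bytes -/
@[voff] def Residue.part_size : Nat := 8
/-- `uint8 Residue.classifications`: offset 12, 1 bytes -/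
@[voff] def Residue.classifications : Nat := 12
/-- `uint8 Residue.classbook`: offset 13, 1 bytes -/
@[voff] def Residue.classbook : Nat := 13
/-- `uint8 * * Residue.classdata`: offset 16, 8 bytes -/
@[voff] def Residue.classdata : Nat := 16
/-- `int16 * Residue.residue_books`: offset 24, 8 bytes -/
@[voff] def Residue.residue_books : Nat := 24

/-! #### `struct MappingChannel`, 3 bytes -/
/-- `sizeof(MappingChannel)` -/
@[voff] def sizeof.MappingChannel : Nat := 3
/-- `uint8 MappingChannel.magnitude`: offset 0, 1 bytes -/
@[voff] def MappingChannel.magnitude : Nat := 0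
/-- `uint8 MappingChannel.angle`: offset 1, 1 bytes -/
@[voff] def MappingChannel.angle : Nat := 1
/-- `uint8 MappingChannel.mux`: offset 2, 1 bytes -/
@[voff] def MappingChannel.mux : Nat := 2

/-! #### `struct Mapping`, 56 bytes -/
/-- `sizeof(Mapping)` -/
@[voff] def sizeof.Mapping : Nat := 56
/-- `uint16 Mapping.coupling_steps`: offset 0, 2 bytes -/
@[voff] def Mapping.coupling_steps : Nat := 0
/-- `MappingChannel * Mapping.chan`: offset 8, 8 bytes -/
@[voff] def Mapping.chan : Nat := 8
/-- `uint8 Mapping.submaps`: offset 16, 1 bytes -/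
@[voff] def Mapping.submaps : Nat := 16
/-- `uint8 Mapping.submap_floor[16]`: offset 17, 16 bytes -/
@[voff] def Mapping.submap_floor : Nat := 17
/-- `Mapping.submap_floor[16]`: number of elements (first index) -/
@[voff] def Mapping.submap_floor.count : Nat := 16
/-- `Mapping.submap_floor[16]`: bytes of one element -/
@[voff] def Mapping.submap_floor.elem : Nat := 1
/-- `uint8 Mapping.submap_residue[16]`: offset 33, 16 bytes -/
@[voff] def Mapping.submap_residue : Nat := 33
/-- `Mapping.submap_residue[16]`: number of elements (first index) -/
@[voff] def Mapping.submap_residue.count : Nat := 16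
/-- `Mapping.submap_residue[16]`: bytes of one element -/
@[voff] def Mapping.submap_residue.elem : Nat := 1

/-! #### `struct Mode`, 6 bytes -/
/-- `sizeof(Mode)` -/
@[voff] def sizeof.Mode : Nat := 6
/-- `uint8 Mode.blockflag`: offset 0, 1 bytes -/
@[voff] def Mode.blockflag : Nat := 0
/-- `uint8 Mode.mapping`: offset 1, 1 bytes -/
@[voff] def Mode.mapping : Nat := 1
/-- `uint16 Mode.windowtype`: offset 2, 2 bytes -/
@[voff] def Mode.windowtype : Nat := 2
/-- `uint16 Mode.transformtype`: offset 4, 2 bytes -/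
@[voff] def Mode.transformtype : Nat := 4

/-! #### `struct ProbedPage`, 12 bytes -/
/-- `sizeof(ProbedPage)` -/
@[voff] def sizeof.ProbedPage : Nat := 12
/-- `uint32 ProbedPage.page_start`: offset 0, 4 bytes -/
@[voff] def ProbedPage.page_start : Nat := 0
/-- `uint32 ProbedPage.page_end`: offset 4, 4 bytes -/
@[voff] def ProbedPage.page_end : Nat := 4
/-- `uint32 ProbedPage.last_decoded_sample`: offset 8, 4 bytes -/
@[voff] def ProbedPage.last_decoded_sample : Nat := 8

/-! #### `struct stbv__floor_ordering`, 4 bytes -/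
/-- `sizeof(stbv__floor_ordering)` -/
@[voff] def sizeof.stbv__floor_ordering : Nat := 4
/-- `uint16 stbv__floor_ordering.x`: offset 0, 2 bytes -/
@[voff] def stbv__floor_ordering.x : Nat := 0
/-- `uint16 stbv__floor_ordering.id`: offset 2, 2 bytes -/
@[voff] def stbv__floor_ordering.id : Nat := 2

/-! #### `union bits64`, 8 bytes -/
/-- `sizeof(bits64)` -/
@[voff] def sizeof.bits64 : Nat := 8
/-- `double bits64.d`: offset 0, 8 bytes -/
@[voff] def bits64.d : Nat := 0
/-- `u64 bits64.u`: offset 0, 8 bytes -/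
@[voff] def bits64.u : Nat := 0

/-! #### `struct asan_global`, 64 bytes -/
/-- `sizeof(asan_global)` -/
@[voff] def sizeof.asan_global : Nat := 64
/-- `word asan_global.beg`: offset 0, 8 bytes -/
@[voff] def asan_global.beg : Nat := 0
/-- `word asan_global.size`: offset 8, 8 bytes -/
@[voff] def asan_global.size : Nat := 8
/-- `word asan_global.size_with_redzone`: offset 16, 8 bytes -/
@[voff] def asan_global.size_with_redzone : Nat := 16
/-- `word asan_global.name`: offset 24, 8 bytes -/
@[voff] def asan_global.name : Nat := 24
/-- `word asan_global.module_name`: offset 32, 8 bytes -/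
@[voff] def asan_global.module_name : Nat := 32
/-- `word asan_global.has_dynamic_init`: offset 40, 8 bytes -/
@[voff] def asan_global.has_dynamic_init : Nat := 40
/-- `word asan_global.location`: offset 48, 8 bytes -/
@[voff] def asan_global.location : Nat := 48
/-- `word asan_global.odr_indicator`: offset 56, 8 bytes -/
@[voff] def asan_global.odr_indicator : Nat := 56

end Off

/-! ### The accessors (`simp only [vacc, voff]` turns them into typed reads at `p + numeral`) -/

/-! #### `struct stb_vorbis_alloc` -/
/-- the field `char * stb_vorbis_alloc.alloc_buffer`: offset 0, 8 bytes -/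
@[vacc] def stb_vorbis_alloc.alloc_buffer (mem : Mem) (p : Nat) : Nat :=
  mem.ptr (p + Off.stb_vorbis_alloc.alloc_buffer)
/-- the address of element `i` of what `stb_vorbis_alloc.alloc_buffer` points to (`char`, 1 bytes each) -/
@[vacc] def stb_vorbis_alloc.alloc_buffer_at (mem : Mem) (p i : Nat) : Nat :=
  stb_vorbis_alloc.alloc_buffer mem p + i
/-- the field `int stb_vorbis_alloc.alloc_buffer_length_in_bytes`: offset 8, 4 bytes -/
@[vacc] def stb_vorbis_alloc.alloc_buffer_length_in_bytes (mem : Mem) (p : Nat) : Int :=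
  mem.i32 (p + Off.stb_vorbis_alloc.alloc_buffer_length_in_bytes)

/-! #### `struct stb_vorbis` -/
/-- the field `unsigned int stb_vorbis.sample_rate`: offset 0, 4 bytes -/
@[vacc] def stb_vorbis.sample_rate (mem : Mem) (p : Nat) : Nat :=
  mem.u32 (p + Off.stb_vorbis.sample_rate)
/-- the field `int stb_vorbis.channels`: offset 4, 4 bytes -/
@[vacc] def stb_vorbis.channels (mem : Mem) (p : Nat) : Int :=
  mem.i32 (p + Off.stb_vorbis.channels)
/-- the field `unsigned int stb_vorbis.setup_memory_required`: offset 8, 4 bytes -/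
@[vacc] def stb_vorbis.setup_memory_required (mem : Mem) (p : Nat) : Nat :=
  mem.u32 (p + Off.stb_vorbis.setup_memory_required)
/-- the field `unsigned int stb_vorbis.temp_memory_required`: offset 12, 4 bytes -/
@[vacc] def stb_vorbis.temp_memory_required (mem : Mem) (p : Nat) : Nat :=
  mem.u32 (p + Off.stb_vorbis.temp_memory_required)
/-- the field `unsigned int stb_vorbis.setup_temp_memory_required`: offset 16, 4 bytes -/
@[vacc] def stb_vorbis.setup_temp_memory_required (mem : Mem) (p : Nat) : Nat :=
  mem.u32 (p + Off.stb_vorbis.setup_temp_memory_required)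
/-- the field `char * stb_vorbis.vendor`: offset 24, 8 bytes -/
@[vacc] def stb_vorbis.vendor (mem : Mem) (p : Nat) : Nat :=
  mem.ptr (p + Off.stb_vorbis.vendor)
/-- the address of element `i` of what `stb_vorbis.vendor` points to (`char`, 1 bytes each) -/
@[vacc] def stb_vorbis.vendor_at (mem : Mem) (p i : Nat) : Nat :=
  stb_vorbis.vendor mem p + i
/-- the field `int stb_vorbis.comment_list_length`: offset 32, 4 bytes -/
@[vacc] def stb_vorbis.comment_list_length (mem : Mem) (p : Nat) : Int :=
  mem.i32 (p + Off.stb_vorbis.comment_list_length)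
/-- the field `char * * stb_vorbis.comment_list`: offset 40, 8 bytes -/
@[vacc] def stb_vorbis.comment_list (mem : Mem) (p : Nat) : Nat :=
  mem.ptr (p + Off.stb_vorbis.comment_list)
/-- the address of element `i` of what `stb_vorbis.comment_list` points to (`char *`, 8 bytes each) -/
@[vacc] def stb_vorbis.comment_list_at (mem : Mem) (p i : Nat) : Nat :=
  stb_vorbis.comment_list mem p + 8 * i
/-- the field `uint8 * stb_vorbis.stream`: offset 48, 8 bytes -/
@[vacc] def stb_vorbis.stream (mem : Mem) (p : Nat) : Nat :=
  mem.ptr (p + Off.stb_vorbis.stream)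
/-- the address of element `i` of what `stb_vorbis.stream` points to (`uint8`, 1 bytes each) -/
@[vacc] def stb_vorbis.stream_at (mem : Mem) (p i : Nat) : Nat :=
  stb_vorbis.stream mem p + i
/-- the field `uint8 * stb_vorbis.stream_start`: offset 56, 8 bytes -/
@[vacc] def stb_vorbis.stream_start (mem : Mem) (p : Nat) : Nat :=
  mem.ptr (p + Off.stb_vorbis.stream_start)
/-- the address of element `i` of what `stb_vorbis.stream_start` points to (`uint8`, 1 bytes each) -/
@[vacc] def stb_vorbis.stream_start_at (mem : Mem) (p i : Nat) : Nat :=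
  stb_vorbis.stream_start mem p + i
/-- the field `uint8 * stb_vorbis.stream_end`: offset 64, 8 bytes -/
@[vacc] def stb_vorbis.stream_end (mem : Mem) (p : Nat) : Nat :=
  mem.ptr (p + Off.stb_vorbis.stream_end)
/-- the address of element `i` of what `stb_vorbis.stream_end` points to (`uint8`, 1 bytes each) -/
@[vacc] def stb_vorbis.stream_end_at (mem : Mem) (p i : Nat) : Nat :=
  stb_vorbis.stream_end mem p + i
/-- the field `uint32 stb_vorbis.stream_len`: offset 72, 4 bytes -/
@[vacc] def stb_vorbis.stream_len (mem : Mem) (p : Nat) : Nat :=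
  mem.u32 (p + Off.stb_vorbis.stream_len)
/-- the field `uint8 stb_vorbis.push_mode`: offset 76, 1 bytes -/
@[vacc] def stb_vorbis.push_mode (mem : Mem) (p : Nat) : Nat :=
  mem.u8 (p + Off.stb_vorbis.push_mode)
/-- the field `uint32 stb_vorbis.first_audio_page_offset`: offset 80, 4 bytes -/
@[vacc] def stb_vorbis.first_audio_page_offset (mem : Mem) (p : Nat) : Nat :=
  mem.u32 (p + Off.stb_vorbis.first_audio_page_offset)
/-- the address of the embedded `ProbedPage stb_vorbis.p_first`: offset 84, 12 bytes -/
@[vacc] def stb_vorbis.p_first_at (p : Nat) : Nat :=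
  p + Off.stb_vorbis.p_first
/-- the field `uint32 stb_vorbis.p_first.page_start`: offset 84, 4 bytes -/
@[vacc] def stb_vorbis.p_first.page_start (mem : Mem) (p : Nat) : Nat :=
  mem.u32 (p + Off.stb_vorbis.p_first.page_start)
/-- the field `uint32 stb_vorbis.p_first.page_end`: offset 88, 4 bytes -/
@[vacc] def stb_vorbis.p_first.page_end (mem : Mem) (p : Nat) : Nat :=
  mem.u32 (p + Off.stb_vorbis.p_first.page_end)
/-- the field `uint32 stb_vorbis.p_first.last_decoded_sample`: offset 92, 4 bytes -/
@[vacc] def stb_vorbis.p_first.last_decoded_sample (mem : Mem) (p : Nat) : Nat :=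
  mem.u32 (p + Off.stb_vorbis.p_first.last_decoded_sample)
/-- the address of the embedded `ProbedPage stb_vorbis.p_last`: offset 96, 12 bytes -/
@[vacc] def stb_vorbis.p_last_at (p : Nat) : Nat :=
  p + Off.stb_vorbis.p_last
/-- the field `uint32 stb_vorbis.p_last.page_start`: offset 96, 4 bytes -/
@[vacc] def stb_vorbis.p_last.page_start (mem : Mem) (p : Nat) : Nat :=
  mem.u32 (p + Off.stb_vorbis.p_last.page_start)
/-- the field `uint32 stb_vorbis.p_last.page_end`: offset 100, 4 bytes -/
@[vacc] def stb_vorbis.p_last.page_end (mem : Mem) (p : Nat) : Nat :=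
  mem.u32 (p + Off.stb_vorbis.p_last.page_end)
/-- the field `uint32 stb_vorbis.p_last.last_decoded_sample`: offset 104, 4 bytes -/
@[vacc] def stb_vorbis.p_last.last_decoded_sample (mem : Mem) (p : Nat) : Nat :=
  mem.u32 (p + Off.stb_vorbis.p_last.last_decoded_sample)
/-- the address of the embedded `stb_vorbis_alloc stb_vorbis.alloc`: offset 112, 16 bytes -/
@[vacc] def stb_vorbis.alloc_at (p : Nat) : Nat :=
  p + Off.stb_vorbis.alloc
/-- the field `char * stb_vorbis.alloc.alloc_buffer`: offset 112, 8 bytes -/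
@[vacc] def stb_vorbis.alloc.alloc_buffer (mem : Mem) (p : Nat) : Nat :=
  mem.ptr (p + Off.stb_vorbis.alloc.alloc_buffer)
/-- the address of element `i` of what `stb_vorbis.alloc.alloc_buffer` points to (`char`, 1 bytes each) -/
@[vacc] def stb_vorbis.alloc.alloc_buffer_at (mem : Mem) (p i : Nat) : Nat :=
  stb_vorbis.alloc.alloc_buffer mem p + i
/-- the field `int stb_vorbis.alloc.alloc_buffer_length_in_bytes`: offset 120, 4 bytes -/
@[vacc] def stb_vorbis.alloc.alloc_buffer_length_in_bytes (mem : Mem) (p : Nat) : Int :=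
  mem.i32 (p + Off.stb_vorbis.alloc.alloc_buffer_length_in_bytes)
/-- the field `int stb_vorbis.setup_offset`: offset 128, 4 bytes -/
@[vacc] def stb_vorbis.setup_offset (mem : Mem) (p : Nat) : Int :=
  mem.i32 (p + Off.stb_vorbis.setup_offset)
/-- the field `int stb_vorbis.temp_offset`: offset 132, 4 bytes -/
@[vacc] def stb_vorbis.temp_offset (mem : Mem) (p : Nat) : Int :=
  mem.i32 (p + Off.stb_vorbis.temp_offset)
/-- the field `int stb_vorbis.eof`: offset 136, 4 bytes -/
@[vacc] def stb_vorbis.eof (mem : Mem) (p : Nat) : Int :=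
  mem.i32 (p + Off.stb_vorbis.eof)
/-- the field `enum STBVorbisError stb_vorbis.error`: offset 140, 4 bytes -/
@[vacc] def stb_vorbis.error (mem : Mem) (p : Nat) : Nat :=
  mem.u32 (p + Off.stb_vorbis.error)
/-- the field `int stb_vorbis.blocksize[2]`: offset 144, 8 bytes -/
@[vacc] def stb_vorbis.blocksize (mem : Mem) (p i : Nat) : Int :=
  mem.i32 (p + Off.stb_vorbis.blocksize + Off.stb_vorbis.blocksize.elem * i)
/-- the field `int stb_vorbis.blocksize_0`: offset 152, 4 bytes -/
@[vacc] def stb_vorbis.blocksize_0 (mem : Mem) (p : Nat) : Int :=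
  mem.i32 (p + Off.stb_vorbis.blocksize_0)
/-- the field `int stb_vorbis.blocksize_1`: offset 156, 4 bytes -/
@[vacc] def stb_vorbis.blocksize_1 (mem : Mem) (p : Nat) : Int :=
  mem.i32 (p + Off.stb_vorbis.blocksize_1)
/-- the field `int stb_vorbis.codebook_count`: offset 160, 4 bytes -/
@[vacc] def stb_vorbis.codebook_count (mem : Mem) (p : Nat) : Int :=
  mem.i32 (p + Off.stb_vorbis.codebook_count)
/-- the field `Codebook * stb_vorbis.codebooks`: offset 168, 8 bytes -/
@[vacc] def stb_vorbis.codebooks (mem : Mem) (p : Nat) : Nat :=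
  mem.ptr (p + Off.stb_vorbis.codebooks)
/-- the address of element `i` of what `stb_vorbis.codebooks` points to (`Codebook`, 2120 bytes each) -/
@[vacc] def stb_vorbis.codebooks_at (mem : Mem) (p i : Nat) : Nat :=
  stb_vorbis.codebooks mem p + Off.sizeof.Codebook * i
/-- the field `int stb_vorbis.floor_count`: offset 176, 4 bytes -/
@[vacc] def stb_vorbis.floor_count (mem : Mem) (p : Nat) : Int :=
  mem.i32 (p + Off.stb_vorbis.floor_count)
/-- the field `uint16 stb_vorbis.floor_types[64]`: offset 180, 128 bytes -/
@[vacc] def stb_vorbis.floor_types (mem : Mem) (p i : Nat) : Nat :=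
  mem.u16 (p + Off.stb_vorbis.floor_types + Off.stb_vorbis.floor_types.elem * i)
/-- the field `Floor * stb_vorbis.floor_config`: offset 312, 8 bytes -/
@[vacc] def stb_vorbis.floor_config (mem : Mem) (p : Nat) : Nat :=
  mem.ptr (p + Off.stb_vorbis.floor_config)
/-- the address of element `i` of what `stb_vorbis.floor_config` points to (`Floor`, 1596 bytes each) -/
@[vacc] def stb_vorbis.floor_config_at (mem : Mem) (p i : Nat) : Nat :=
  stb_vorbis.floor_config mem p + Off.sizeof.Floor * i
/-- the field `int stb_vorbis.residue_count`: offset 320, 4 bytes -/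
@[vacc] def stb_vorbis.residue_count (mem : Mem) (p : Nat) : Int :=
  mem.i32 (p + Off.stb_vorbis.residue_count)
/-- the field `uint16 stb_vorbis.residue_types[64]`: offset 324, 128 bytes -/
@[vacc] def stb_vorbis.residue_types (mem : Mem) (p i : Nat) : Nat :=
  mem.u16 (p + Off.stb_vorbis.residue_types + Off.stb_vorbis.residue_types.elem * i)
/-- the field `Residue * stb_vorbis.residue_config`: offset 456, 8 bytes -/
@[vacc] def stb_vorbis.residue_config (mem : Mem) (p : Nat) : Nat :=
  mem.ptr (p + Off.stb_vorbis.residue_config)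
/-- the address of element `i` of what `stb_vorbis.residue_config` points to (`Residue`, 32 bytes each) -/
@[vacc] def stb_vorbis.residue_config_at (mem : Mem) (p i : Nat) : Nat :=
  stb_vorbis.residue_config mem p + Off.sizeof.Residue * i
/-- the field `int stb_vorbis.mapping_count`: offset 464, 4 bytes -/
@[vacc] def stb_vorbis.mapping_count (mem : Mem) (p : Nat) : Int :=
  mem.i32 (p + Off.stb_vorbis.mapping_count)
/-- the field `Mapping * stb_vorbis.mapping`: offset 472, 8 bytes -/
@[vacc] def stb_vorbis.mapping (mem : Mem) (p : Nat) : Nat :=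
  mem.ptr (p + Off.stb_vorbis.mapping)
/-- the address of element `i` of what `stb_vorbis.mapping` points to (`Mapping`, 56 bytes each) -/
@[vacc] def stb_vorbis.mapping_at (mem : Mem) (p i : Nat) : Nat :=
  stb_vorbis.mapping mem p + Off.sizeof.Mapping * i
/-- the field `int stb_vorbis.mode_count`: offset 480, 4 bytes -/
@[vacc] def stb_vorbis.mode_count (mem : Mem) (p : Nat) : Int :=
  mem.i32 (p + Off.stb_vorbis.mode_count)
/-- the address of the embedded `Mode stb_vorbis.mode_config[64]`: offset 484, 384 bytes -/
@[vacc] def stb_vorbis.mode_config_at (p i : Nat) : Nat :=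
  p + Off.stb_vorbis.mode_config + Off.stb_vorbis.mode_config.elem * i
/-- the field `uint32 stb_vorbis.total_samples`: offset 868, 4 bytes -/
@[vacc] def stb_vorbis.total_samples (mem : Mem) (p : Nat) : Nat :=
  mem.u32 (p + Off.stb_vorbis.total_samples)
/-- the field `float * stb_vorbis.channel_buffers[16]`: offset 872, 128 bytes -/
@[vacc] def stb_vorbis.channel_buffers (mem : Mem) (p i : Nat) : Nat :=
  mem.ptr (p + Off.stb_vorbis.channel_buffers + Off.stb_vorbis.channel_buffers.elem * i)
/-- the address of element `n` of what `stb_vorbis.channel_buffers[16]` points to (`float`, 4 bytes each) -/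
@[vacc] def stb_vorbis.channel_buffers_at (mem : Mem) (p i n : Nat) : Nat :=
  stb_vorbis.channel_buffers mem p i + 4 * n
/-- the field `float * stb_vorbis.outputs[16]`: offset 1000, 128 bytes -/
@[vacc] def stb_vorbis.outputs (mem : Mem) (p i : Nat) : Nat :=
  mem.ptr (p + Off.stb_vorbis.outputs + Off.stb_vorbis.outputs.elem * i)
/-- the address of element `n` of what `stb_vorbis.outputs[16]` points to (`float`, 4 bytes each) -/
@[vacc] def stb_vorbis.outputs_at (mem : Mem) (p i n : Nat) : Nat :=
  stb_vorbis.outputs mem p i + 4 * n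
/-- the field `float * stb_vorbis.previous_window[16]`: offset 1128, 128 bytes -/
@[vacc] def stb_vorbis.previous_window (mem : Mem) (p i : Nat) : Nat :=
  mem.ptr (p + Off.stb_vorbis.previous_window + Off.stb_vorbis.previous_window.elem * i)
/-- the address of element `n` of what `stb_vorbis.previous_window[16]` points to (`float`, 4 bytes each) -/
@[vacc] def stb_vorbis.previous_window_at (mem : Mem) (p i n : Nat) : Nat :=
  stb_vorbis.previous_window mem p i + 4 * n
/-- the field `int stb_vorbis.previous_length`: offset 1256, 4 bytes -/
@[vacc] def stb_vorbis.previous_length (mem : Mem) (p : Nat) : Int :=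
  mem.i32 (p + Off.stb_vorbis.previous_length)
/-- the field `int16 * stb_vorbis.finalY[16]`: offset 1264, 128 bytes -/
@[vacc] def stb_vorbis.finalY (mem : Mem) (p i : Nat) : Nat :=
  mem.ptr (p + Off.stb_vorbis.finalY + Off.stb_vorbis.finalY.elem * i)
/-- the address of element `n` of what `stb_vorbis.finalY[16]` points to (`int16`, 2 bytes each) -/
@[vacc] def stb_vorbis.finalY_at (mem : Mem) (p i n : Nat) : Nat :=
  stb_vorbis.finalY mem p i + 2 * n
/-- the field `uint32 stb_vorbis.current_loc`: offset 1392, 4 bytes -/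
@[vacc] def stb_vorbis.current_loc (mem : Mem) (p : Nat) : Nat :=
  mem.u32 (p + Off.stb_vorbis.current_loc)
/-- the field `int stb_vorbis.current_loc_valid`: offset 1396, 4 bytes -/
@[vacc] def stb_vorbis.current_loc_valid (mem : Mem) (p : Nat) : Int :=
  mem.i32 (p + Off.stb_vorbis.current_loc_valid)
/-- the field `float * stb_vorbis.A[2]`: offset 1400, 16 bytes -/
@[vacc] def stb_vorbis.A (mem : Mem) (p i : Nat) : Nat :=
  mem.ptr (p + Off.stb_vorbis.A + Off.stb_vorbis.A.elem * i)
/-- the address of element `n` of what `stb_vorbis.A[2]` points to (`float`, 4 bytes each) -/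
@[vacc] def stb_vorbis.A_at (mem : Mem) (p i n : Nat) : Nat :=
  stb_vorbis.A mem p i + 4 * n
/-- the field `float * stb_vorbis.B[2]`: offset 1416, 16 bytes -/
@[vacc] def stb_vorbis.B (mem : Mem) (p i : Nat) : Nat :=
  mem.ptr (p + Off.stb_vorbis.B + Off.stb_vorbis.B.elem * i)
/-- the address of element `n` of what `stb_vorbis.B[2]` points to (`float`, 4 bytes each) -/
@[vacc] def stb_vorbis.B_at (mem : Mem) (p i n : Nat) : Nat :=
  stb_vorbis.B mem p i + 4 * n
/-- the field `float * stb_vorbis.C[2]`: offset 1432, 16 bytes -/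
@[vacc] def stb_vorbis.C (mem : Mem) (p i : Nat) : Nat :=
  mem.ptr (p + Off.stb_vorbis.C + Off.stb_vorbis.C.elem * i)
/-- the address of element `n` of what `stb_vorbis.C[2]` points to (`float`, 4 bytes each) -/
@[vacc] def stb_vorbis.C_at (mem : Mem) (p i n : Nat) : Nat :=
  stb_vorbis.C mem p i + 4 * n
/-- the field `float * stb_vorbis.window[2]`: offset 1448, 16 bytes -/
@[vacc] def stb_vorbis.window (mem : Mem) (p i : Nat) : Nat :=
  mem.ptr (p + Off.stb_vorbis.window + Off.stb_vorbis.window.elem * i)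
/-- the address of element `n` of what `stb_vorbis.window[2]` points to (`float`, 4 bytes each) -/
@[vacc] def stb_vorbis.window_at (mem : Mem) (p i n : Nat) : Nat :=
  stb_vorbis.window mem p i + 4 * n
/-- the field `uint16 * stb_vorbis.bit_reverse[2]`: offset 1464, 16 bytes -/
@[vacc] def stb_vorbis.bit_reverse (mem : Mem) (p i : Nat) : Nat :=
  mem.ptr (p + Off.stb_vorbis.bit_reverse + Off.stb_vorbis.bit_reverse.elem * i)
/-- the address of element `n` of what `stb_vorbis.bit_reverse[2]` points to (`uint16`, 2 bytes each) -/
@[vacc] def stb_vorbis.bit_reverse_at (mem : Mem) (p i n : Nat) : Nat :=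
  stb_vorbis.bit_reverse mem p i + 2 * n
/-- the field `uint32 stb_vorbis.serial`: offset 1480, 4 bytes -/
@[vacc] def stb_vorbis.serial (mem : Mem) (p : Nat) : Nat :=
  mem.u32 (p + Off.stb_vorbis.serial)
/-- the field `int stb_vorbis.last_page`: offset 1484, 4 bytes -/
@[vacc] def stb_vorbis.last_page (mem : Mem) (p : Nat) : Int :=
  mem.i32 (p + Off.stb_vorbis.last_page)
/-- the field `int stb_vorbis.segment_count`: offset 1488, 4 bytes -/
@[vacc] def stb_vorbis.segment_count (mem : Mem) (p : Nat) : Int :=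
  mem.i32 (p + Off.stb_vorbis.segment_count)
/-- the field `uint8 stb_vorbis.segments[255]`: offset 1492, 255 bytes -/
@[vacc] def stb_vorbis.segments (mem : Mem) (p i : Nat) : Nat :=
  mem.u8 (p + Off.stb_vorbis.segments + i)
/-- the field `uint8 stb_vorbis.page_flag`: offset 1747, 1 bytes -/
@[vacc] def stb_vorbis.page_flag (mem : Mem) (p : Nat) : Nat :=
  mem.u8 (p + Off.stb_vorbis.page_flag)
/-- the field `uint8 stb_vorbis.bytes_in_seg`: offset 1748, 1 bytes -/
@[vacc] def stb_vorbis.bytes_in_seg (mem : Mem) (p : Nat) : Nat :=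
  mem.u8 (p + Off.stb_vorbis.bytes_in_seg)
/-- the field `uint8 stb_vorbis.first_decode`: offset 1749, 1 bytes -/
@[vacc] def stb_vorbis.first_decode (mem : Mem) (p : Nat) : Nat :=
  mem.u8 (p + Off.stb_vorbis.first_decode)
/-- the field `int stb_vorbis.next_seg`: offset 1752, 4 bytes -/
@[vacc] def stb_vorbis.next_seg (mem : Mem) (p : Nat) : Int :=
  mem.i32 (p + Off.stb_vorbis.next_seg)
/-- the field `int stb_vorbis.last_seg`: offset 1756, 4 bytes -/
@[vacc] def stb_vorbis.last_seg (mem : Mem) (p : Nat) : Int :=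
  mem.i32 (p + Off.stb_vorbis.last_seg)
/-- the field `int stb_vorbis.last_seg_which`: offset 1760, 4 bytes -/
@[vacc] def stb_vorbis.last_seg_which (mem : Mem) (p : Nat) : Int :=
  mem.i32 (p + Off.stb_vorbis.last_seg_which)
/-- the field `uint32 stb_vorbis.acc`: offset 1764, 4 bytes -/
@[vacc] def stb_vorbis.acc (mem : Mem) (p : Nat) : Nat :=
  mem.u32 (p + Off.stb_vorbis.acc)
/-- the field `int stb_vorbis.valid_bits`: offset 1768, 4 bytes -/
@[vacc] def stb_vorbis.valid_bits (mem : Mem) (p : Nat) : Int :=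
  mem.i32 (p + Off.stb_vorbis.valid_bits)
/-- the field `int stb_vorbis.packet_bytes`: offset 1772, 4 bytes -/
@[vacc] def stb_vorbis.packet_bytes (mem : Mem) (p : Nat) : Int :=
  mem.i32 (p + Off.stb_vorbis.packet_bytes)
/-- the field `int stb_vorbis.end_seg_with_known_loc`: offset 1776, 4 bytes -/
@[vacc] def stb_vorbis.end_seg_with_known_loc (mem : Mem) (p : Nat) : Int :=
  mem.i32 (p + Off.stb_vorbis.end_seg_with_known_loc)
/-- the field `uint32 stb_vorbis.known_loc_for_packet`: offset 1780, 4 bytes -/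
@[vacc] def stb_vorbis.known_loc_for_packet (mem : Mem) (p : Nat) : Nat :=
  mem.u32 (p + Off.stb_vorbis.known_loc_for_packet)
/-- the field `int stb_vorbis.discard_samples_deferred`: offset 1784, 4 bytes -/
@[vacc] def stb_vorbis.discard_samples_deferred (mem : Mem) (p : Nat) : Int :=
  mem.i32 (p + Off.stb_vorbis.discard_samples_deferred)
/-- the field `uint32 stb_vorbis.samples_output`: offset 1788, 4 bytes -/
@[vacc] def stb_vorbis.samples_output (mem : Mem) (p : Nat) : Nat :=
  mem.u32 (p + Off.stb_vorbis.samples_output)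
/-- the field `int stb_vorbis.page_crc_tests`: offset 1792, 4 bytes -/
@[vacc] def stb_vorbis.page_crc_tests (mem : Mem) (p : Nat) : Int :=
  mem.i32 (p + Off.stb_vorbis.page_crc_tests)
/-- the field `int stb_vorbis.channel_buffer_start`: offset 1796, 4 bytes -/
@[vacc] def stb_vorbis.channel_buffer_start (mem : Mem) (p : Nat) : Int :=
  mem.i32 (p + Off.stb_vorbis.channel_buffer_start)
/-- the field `int stb_vorbis.channel_buffer_end`: offset 1800, 4 bytes -/
@[vacc] def stb_vorbis.channel_buffer_end (mem : Mem) (p : Nat) : Int :=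
  mem.i32 (p + Off.stb_vorbis.channel_buffer_end)

/-! #### `struct stb_vorbis_info` -/
/-- the field `unsigned int stb_vorbis_info.sample_rate`: offset 0, 4 bytes -/
@[vacc] def stb_vorbis_info.sample_rate (mem : Mem) (p : Nat) : Nat :=
  mem.u32 (p + Off.stb_vorbis_info.sample_rate)
/-- the field `int stb_vorbis_info.channels`: offset 4, 4 bytes -/
@[vacc] def stb_vorbis_info.channels (mem : Mem) (p : Nat) : Int :=
  mem.i32 (p + Off.stb_vorbis_info.channels)
/-- the field `unsigned int stb_vorbis_info.setup_memory_required`: offset 8, 4 bytes -/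
@[vacc] def stb_vorbis_info.setup_memory_required (mem : Mem) (p : Nat) : Nat :=
  mem.u32 (p + Off.stb_vorbis_info.setup_memory_required)
/-- the field `unsigned int stb_vorbis_info.setup_temp_memory_required`: offset 12, 4 bytes -/
@[vacc] def stb_vorbis_info.setup_temp_memory_required (mem : Mem) (p : Nat) : Nat :=
  mem.u32 (p + Off.stb_vorbis_info.setup_temp_memory_required)
/-- the field `unsigned int stb_vorbis_info.temp_memory_required`: offset 16, 4 bytes -/
@[vacc] def stb_vorbis_info.temp_memory_required (mem : Mem) (p : Nat) : Nat :=
  mem.u32 (p + Off.stb_vorbis_info.temp_memory_required)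
/-- the field `int stb_vorbis_info.max_frame_size`: offset 20, 4 bytes -/
@[vacc] def stb_vorbis_info.max_frame_size (mem : Mem) (p : Nat) : Int :=
  mem.i32 (p + Off.stb_vorbis_info.max_frame_size)

/-! #### `struct stb_vorbis_comment` -/
/-- the field `char * stb_vorbis_comment.vendor`: offset 0, 8 bytes -/
@[vacc] def stb_vorbis_comment.vendor (mem : Mem) (p : Nat) : Nat :=
  mem.ptr (p + Off.stb_vorbis_comment.vendor)
/-- the address of element `i` of what `stb_vorbis_comment.vendor` points to (`char`, 1 bytes each) -/
@[vacc] def stb_vorbis_comment.vendor_at (mem : Mem) (p i : Nat) : Nat :=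
  stb_vorbis_comment.vendor mem p + i
/-- the field `int stb_vorbis_comment.comment_list_length`: offset 8, 4 bytes -/
@[vacc] def stb_vorbis_comment.comment_list_length (mem : Mem) (p : Nat) : Int :=
  mem.i32 (p + Off.stb_vorbis_comment.comment_list_length)
/-- the field `char * * stb_vorbis_comment.comment_list`: offset 16, 8 bytes -/
@[vacc] def stb_vorbis_comment.comment_list (mem : Mem) (p : Nat) : Nat :=
  mem.ptr (p + Off.stb_vorbis_comment.comment_list)
/-- the address of element `i` of what `stb_vorbis_comment.comment_list` points to (`char *`, 8 bytes each) -/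
@[vacc] def stb_vorbis_comment.comment_list_at (mem : Mem) (p i : Nat) : Nat :=
  stb_vorbis_comment.comment_list mem p + 8 * i

/-! #### `struct Codebook` -/
/-- the field `int Codebook.dimensions`: offset 0, 4 bytes -/
@[vacc] def Codebook.dimensions (mem : Mem) (p : Nat) : Int :=
  mem.i32 (p + Off.Codebook.dimensions)
/-- the field `int Codebook.entries`: offset 4, 4 bytes -/
@[vacc] def Codebook.entries (mem : Mem) (p : Nat) : Int :=
  mem.i32 (p + Off.Codebook.entries)
/-- the field `uint8 * Codebook.codeword_lengths`: offset 8, 8 bytes -/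
@[vacc] def Codebook.codeword_lengths (mem : Mem) (p : Nat) : Nat :=
  mem.ptr (p + Off.Codebook.codeword_lengths)
/-- the address of element `i` of what `Codebook.codeword_lengths` points to (`uint8`, 1 bytes each) -/
@[vacc] def Codebook.codeword_lengths_at (mem : Mem) (p i : Nat) : Nat :=
  Codebook.codeword_lengths mem p + i
/-- the field `float Codebook.minimum_value`: offset 16, 4 bytes -/
@[vacc] def Codebook.minimum_value (mem : Mem) (p : Nat) : Nat :=
  mem.f32bits (p + Off.Codebook.minimum_value)
/-- the field `float Codebook.delta_value`: offset 20, 4 bytes -/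
@[vacc] def Codebook.delta_value (mem : Mem) (p : Nat) : Nat :=
  mem.f32bits (p + Off.Codebook.delta_value)
/-- the field `uint8 Codebook.value_bits`: offset 24, 1 bytes -/
@[vacc] def Codebook.value_bits (mem : Mem) (p : Nat) : Nat :=
  mem.u8 (p + Off.Codebook.value_bits)
/-- the field `uint8 Codebook.lookup_type`: offset 25, 1 bytes -/
@[vacc] def Codebook.lookup_type (mem : Mem) (p : Nat) : Nat :=
  mem.u8 (p + Off.Codebook.lookup_type)
/-- the field `uint8 Codebook.sequence_p`: offset 26, 1 bytes -/
@[vacc] def Codebook.sequence_p (mem : Mem) (p : Nat) : Nat :=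
  mem.u8 (p + Off.Codebook.sequence_p)
/-- the field `uint8 Codebook.sparse`: offset 27, 1 bytes -/
@[vacc] def Codebook.sparse (mem : Mem) (p : Nat) : Nat :=
  mem.u8 (p + Off.Codebook.sparse)
/-- the field `uint32 Codebook.lookup_values`: offset 28, 4 bytes -/
@[vacc] def Codebook.lookup_values (mem : Mem) (p : Nat) : Nat :=
  mem.u32 (p + Off.Codebook.lookup_values)
/-- the field `codetype * Codebook.multiplicands`: offset 32, 8 bytes -/
@[vacc] def Codebook.multiplicands (mem : Mem) (p : Nat) : Nat :=
  mem.ptr (p + Off.Codebook.multiplicands)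
/-- the address of element `i` of what `Codebook.multiplicands` points to (`codetype`, 4 bytes each) -/
@[vacc] def Codebook.multiplicands_at (mem : Mem) (p i : Nat) : Nat :=
  Codebook.multiplicands mem p + 4 * i
/-- the field `uint32 * Codebook.codewords`: offset 40, 8 bytes -/
@[vacc] def Codebook.codewords (mem : Mem) (p : Nat) : Nat :=
  mem.ptr (p + Off.Codebook.codewords)
/-- the address of element `i` of what `Codebook.codewords` points to (`uint32`, 4 bytes each) -/
@[vacc] def Codebook.codewords_at (mem : Mem) (p i : Nat) : Nat :=
  Codebook.codewords mem p + 4 * i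
/-- the field `int16 Codebook.fast_huffman[1024]`: offset 48, 2048 bytes -/
@[vacc] def Codebook.fast_huffman (mem : Mem) (p i : Nat) : Int :=
  mem.i16 (p + Off.Codebook.fast_huffman + Off.Codebook.fast_huffman.elem * i)
/-- the field `uint32 * Codebook.sorted_codewords`: offset 2096, 8 bytes -/
@[vacc] def Codebook.sorted_codewords (mem : Mem) (p : Nat) : Nat :=
  mem.ptr (p + Off.Codebook.sorted_codewords)
/-- the address of element `i` of what `Codebook.sorted_codewords` points to (`uint32`, 4 bytes each) -/
@[vacc] def Codebook.sorted_codewords_at (mem : Mem) (p i : Nat) : Nat :=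
  Codebook.sorted_codewords mem p + 4 * i
/-- the field `int * Codebook.sorted_values`: offset 2104, 8 bytes -/
@[vacc] def Codebook.sorted_values (mem : Mem) (p : Nat) : Nat :=
  mem.ptr (p + Off.Codebook.sorted_values)
/-- the address of element `i` of what `Codebook.sorted_values` points to (`int`, 4 bytes each) -/
@[vacc] def Codebook.sorted_values_at (mem : Mem) (p i : Nat) : Nat :=
  Codebook.sorted_values mem p + 4 * i
/-- the field `int Codebook.sorted_entries`: offset 2112, 4 bytes -/
@[vacc] def Codebook.sorted_entries (mem : Mem) (p : Nat) : Int :=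
  mem.i32 (p + Off.Codebook.sorted_entries)

/-! #### `struct Floor0` -/
/-- the field `uint8 Floor0.order`: offset 0, 1 bytes -/
@[vacc] def Floor0.order (mem : Mem) (p : Nat) : Nat :=
  mem.u8 (p + Off.Floor0.order)
/-- the field `uint16 Floor0.rate`: offset 2, 2 bytes -/
@[vacc] def Floor0.rate (mem : Mem) (p : Nat) : Nat :=
  mem.u16 (p + Off.Floor0.rate)
/-- the field `uint16 Floor0.bark_map_size`: offset 4, 2 bytes -/
@[vacc] def Floor0.bark_map_size (mem : Mem) (p : Nat) : Nat :=
  mem.u16 (p + Off.Floor0.bark_map_size)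
/-- the field `uint8 Floor0.amplitude_bits`: offset 6, 1 bytes -/
@[vacc] def Floor0.amplitude_bits (mem : Mem) (p : Nat) : Nat :=
  mem.u8 (p + Off.Floor0.amplitude_bits)
/-- the field `uint8 Floor0.amplitude_offset`: offset 7, 1 bytes -/
@[vacc] def Floor0.amplitude_offset (mem : Mem) (p : Nat) : Nat :=
  mem.u8 (p + Off.Floor0.amplitude_offset)
/-- the field `uint8 Floor0.number_of_books`: offset 8, 1 bytes -/
@[vacc] def Floor0.number_of_books (mem : Mem) (p : Nat) : Nat :=
  mem.u8 (p + Off.Floor0.number_of_books)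
/-- the field `uint8 Floor0.book_list[16]`: offset 9, 16 bytes -/
@[vacc] def Floor0.book_list (mem : Mem) (p i : Nat) : Nat :=
  mem.u8 (p + Off.Floor0.book_list + i)

/-! #### `struct Floor1` -/
/-- the field `uint8 Floor1.partitions`: offset 0, 1 bytes -/
@[vacc] def Floor1.partitions (mem : Mem) (p : Nat) : Nat :=
  mem.u8 (p + Off.Floor1.partitions)
/-- the field `uint8 Floor1.partition_class_list[32]`: offset 1, 32 bytes -/
@[vacc] def Floor1.partition_class_list (mem : Mem) (p i : Nat) : Nat :=
  mem.u8 (p + Off.Floor1.partition_class_list + i)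
/-- the field `uint8 Floor1.class_dimensions[16]`: offset 33, 16 bytes -/
@[vacc] def Floor1.class_dimensions (mem : Mem) (p i : Nat) : Nat :=
  mem.u8 (p + Off.Floor1.class_dimensions + i)
/-- the field `uint8 Floor1.class_subclasses[16]`: offset 49, 16 bytes -/
@[vacc] def Floor1.class_subclasses (mem : Mem) (p i : Nat) : Nat :=
  mem.u8 (p + Off.Floor1.class_subclasses + i)
/-- the field `uint8 Floor1.class_masterbooks[16]`: offset 65, 16 bytes -/
@[vacc] def Floor1.class_masterbooks (mem : Mem) (p i : Nat) : Nat :=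
  mem.u8 (p + Off.Floor1.class_masterbooks + i)
/-- the field `int16 Floor1.subclass_books[16][8]`: offset 82, 256 bytes -/
@[vacc] def Floor1.subclass_books (mem : Mem) (p j k : Nat) : Int :=
  mem.i16 (p + Off.Floor1.subclass_books + Off.Floor1.subclass_books.elem * (Off.Floor1.subclass_books.count2 * j + k))
/-- the field `uint16 Floor1.Xlist[250]`: offset 338, 500 bytes -/
@[vacc] def Floor1.Xlist (mem : Mem) (p i : Nat) : Nat :=
  mem.u16 (p + Off.Floor1.Xlist + Off.Floor1.Xlist.elem * i)
/-- the field `uint8 Floor1.sorted_order[250]`: offset 838, 250 bytes -/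
@[vacc] def Floor1.sorted_order (mem : Mem) (p i : Nat) : Nat :=
  mem.u8 (p + Off.Floor1.sorted_order + i)
/-- the field `uint8 Floor1.neighbors[250][2]`: offset 1088, 500 bytes -/
@[vacc] def Floor1.neighbors (mem : Mem) (p j k : Nat) : Nat :=
  mem.u8 (p + Off.Floor1.neighbors + (Off.Floor1.neighbors.count2 * j + k))
/-- the field `uint8 Floor1.floor1_multiplier`: offset 1588, 1 bytes -/
@[vacc] def Floor1.floor1_multiplier (mem : Mem) (p : Nat) : Nat :=
  mem.u8 (p + Off.Floor1.floor1_multiplier)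
/-- the field `uint8 Floor1.rangebits`: offset 1589, 1 bytes -/
@[vacc] def Floor1.rangebits (mem : Mem) (p : Nat) : Nat :=
  mem.u8 (p + Off.Floor1.rangebits)
/-- the field `int Floor1.values`: offset 1592, 4 bytes -/
@[vacc] def Floor1.values (mem : Mem) (p : Nat) : Int :=
  mem.i32 (p + Off.Floor1.values)

/-! #### `union Floor` -/
/-- the address of the embedded `Floor0 Floor.floor0`: offset 0, 26 bytes -/
@[vacc] def Floor.floor0_at (p : Nat) : Nat :=
  p + Off.Floor.floor0
/-- the field `uint8 Floor.floor0.order`: offset 0, 1 bytes -/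
@[vacc] def Floor.floor0.order (mem : Mem) (p : Nat) : Nat :=
  mem.u8 (p + Off.Floor.floor0.order)
/-- the field `uint16 Floor.floor0.rate`: offset 2, 2 bytes -/
@[vacc] def Floor.floor0.rate (mem : Mem) (p : Nat) : Nat :=
  mem.u16 (p + Off.Floor.floor0.rate)
/-- the field `uint16 Floor.floor0.bark_map_size`: offset 4, 2 bytes -/
@[vacc] def Floor.floor0.bark_map_size (mem : Mem) (p : Nat) : Nat :=
  mem.u16 (p + Off.Floor.floor0.bark_map_size)
/-- the field `uint8 Floor.floor0.amplitude_bits`: offset 6, 1 bytes -/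
@[vacc] def Floor.floor0.amplitude_bits (mem : Mem) (p : Nat) : Nat :=
  mem.u8 (p + Off.Floor.floor0.amplitude_bits)
/-- the field `uint8 Floor.floor0.amplitude_offset`: offset 7, 1 bytes -/
@[vacc] def Floor.floor0.amplitude_offset (mem : Mem) (p : Nat) : Nat :=
  mem.u8 (p + Off.Floor.floor0.amplitude_offset)
/-- the field `uint8 Floor.floor0.number_of_books`: offset 8, 1 bytes -/
@[vacc] def Floor.floor0.number_of_books (mem : Mem) (p : Nat) : Nat :=
  mem.u8 (p + Off.Floor.floor0.number_of_books)
/-- the field `uint8 Floor.floor0.book_list[16]`: offset 9, 16 bytes -/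
@[vacc] def Floor.floor0.book_list (mem : Mem) (p i : Nat) : Nat :=
  mem.u8 (p + Off.Floor.floor0.book_list + i)
/-- the address of the embedded `Floor1 Floor.floor1`: offset 0, 1596 bytes -/
@[vacc] def Floor.floor1_at (p : Nat) : Nat :=
  p + Off.Floor.floor1
/-- the field `uint8 Floor.floor1.partitions`: offset 0, 1 bytes -/
@[vacc] def Floor.floor1.partitions (mem : Mem) (p : Nat) : Nat :=
  mem.u8 (p + Off.Floor.floor1.partitions)
/-- the field `uint8 Floor.floor1.partition_class_list[32]`: offset 1, 32 bytes -/
@[vacc] def Floor.floor1.partition_class_list (mem : Mem) (p i : Nat) : Nat :=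
  mem.u8 (p + Off.Floor.floor1.partition_class_list + i)
/-- the field `uint8 Floor.floor1.class_dimensions[16]`: offset 33, 16 bytes -/
@[vacc] def Floor.floor1.class_dimensions (mem : Mem) (p i : Nat) : Nat :=
  mem.u8 (p + Off.Floor.floor1.class_dimensions + i)
/-- the field `uint8 Floor.floor1.class_subclasses[16]`: offset 49, 16 bytes -/
@[vacc] def Floor.floor1.class_subclasses (mem : Mem) (p i : Nat) : Nat :=
  mem.u8 (p + Off.Floor.floor1.class_subclasses + i)
/-- the field `uint8 Floor.floor1.class_masterbooks[16]`: offset 65, 16 bytes -/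
@[vacc] def Floor.floor1.class_masterbooks (mem : Mem) (p i : Nat) : Nat :=
  mem.u8 (p + Off.Floor.floor1.class_masterbooks + i)
/-- the field `int16 Floor.floor1.subclass_books[16][8]`: offset 82, 256 bytes -/
@[vacc] def Floor.floor1.subclass_books (mem : Mem) (p j k : Nat) : Int :=
  mem.i16 (p + Off.Floor.floor1.subclass_books + Off.Floor.floor1.subclass_books.elem * (Off.Floor.floor1.subclass_books.count2 * j + k))
/-- the field `uint16 Floor.floor1.Xlist[250]`: offset 338, 500 bytes -/
@[vacc] def Floor.floor1.Xlist (mem : Mem) (p i : Nat) : Nat :=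
  mem.u16 (p + Off.Floor.floor1.Xlist + Off.Floor.floor1.Xlist.elem * i)
/-- the field `uint8 Floor.floor1.sorted_order[250]`: offset 838, 250 bytes -/
@[vacc] def Floor.floor1.sorted_order (mem : Mem) (p i : Nat) : Nat :=
  mem.u8 (p + Off.Floor.floor1.sorted_order + i)
/-- the field `uint8 Floor.floor1.neighbors[250][2]`: offset 1088, 500 bytes -/
@[vacc] def Floor.floor1.neighbors (mem : Mem) (p j k : Nat) : Nat :=
  mem.u8 (p + Off.Floor.floor1.neighbors + (Off.Floor.floor1.neighbors.count2 * j + k))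
/-- the field `uint8 Floor.floor1.floor1_multiplier`: offset 1588, 1 bytes -/
@[vacc] def Floor.floor1.floor1_multiplier (mem : Mem) (p : Nat) : Nat :=
  mem.u8 (p + Off.Floor.floor1.floor1_multiplier)
/-- the field `uint8 Floor.floor1.rangebits`: offset 1589, 1 bytes -/
@[vacc] def Floor.floor1.rangebits (mem : Mem) (p : Nat) : Nat :=
  mem.u8 (p + Off.Floor.floor1.rangebits)
/-- the field `int Floor.floor1.values`: offset 1592, 4 bytes -/
@[vacc] def Floor.floor1.values (mem : Mem) (p : Nat) : Int :=
  mem.i32 (p + Off.Floor.floor1.values)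

/-! #### `struct Residue` -/
/-- the field `uint32 Residue.begin`: offset 0, 4 bytes -/
@[vacc] def Residue.begin (mem : Mem) (p : Nat) : Nat :=
  mem.u32 (p + Off.Residue.begin)
/-- the field `uint32 Residue.end`: offset 4, 4 bytes -/
@[vacc] def Residue.end_ (mem : Mem) (p : Nat) : Nat :=
  mem.u32 (p + Off.Residue.end_)
/-- the field `uint32 Residue.part_size`: offset 8, 4 bytes -/
@[vacc] def Residue.part_size (mem : Mem) (p : Nat) : Nat :=
  mem.u32 (p + Off.Residue.part_size)
/-- the field `uint8 Residue.classifications`: offset 12, 1 bytes -/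
@[vacc] def Residue.classifications (mem : Mem) (p : Nat) : Nat :=
  mem.u8 (p + Off.Residue.classifications)
/-- the field `uint8 Residue.classbook`: offset 13, 1 bytes -/
@[vacc] def Residue.classbook (mem : Mem) (p : Nat) : Nat :=
  mem.u8 (p + Off.Residue.classbook)
/-- the field `uint8 * * Residue.classdata`: offset 16, 8 bytes -/
@[vacc] def Residue.classdata (mem : Mem) (p : Nat) : Nat :=
  mem.ptr (p + Off.Residue.classdata)
/-- the address of element `i` of what `Residue.classdata` points to (`uint8 *`, 8 bytes each) -/
@[vacc] def Residue.classdata_at (mem : Mem) (p i : Nat) : Nat :=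
  Residue.classdata mem p + 8 * i
/-- the field `int16 * Residue.residue_books`: offset 24, 8 bytes -/
@[vacc] def Residue.residue_books (mem : Mem) (p : Nat) : Nat :=
  mem.ptr (p + Off.Residue.residue_books)
/-- the address of element `i` of what `Residue.residue_books` points to (`int16`, 2 bytes each) -/
@[vacc] def Residue.residue_books_at (mem : Mem) (p i : Nat) : Nat :=
  Residue.residue_books mem p + 2 * i

/-! #### `struct MappingChannel` -/
/-- the field `uint8 MappingChannel.magnitude`: offset 0, 1 bytes -/
@[vacc] def MappingChannel.magnitude (mem : Mem) (p : Nat) : Nat :=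
  mem.u8 (p + Off.MappingChannel.magnitude)
/-- the field `uint8 MappingChannel.angle`: offset 1, 1 bytes -/
@[vacc] def MappingChannel.angle (mem : Mem) (p : Nat) : Nat :=
  mem.u8 (p + Off.MappingChannel.angle)
/-- the field `uint8 MappingChannel.mux`: offset 2, 1 bytes -/
@[vacc] def MappingChannel.mux (mem : Mem) (p : Nat) : Nat :=
  mem.u8 (p + Off.MappingChannel.mux)

/-! #### `struct Mapping` -/
/-- the field `uint16 Mapping.coupling_steps`: offset 0, 2 bytes -/
@[vacc] def Mapping.coupling_steps (mem : Mem) (p : Nat) : Nat :=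
  mem.u16 (p + Off.Mapping.coupling_steps)
/-- the field `MappingChannel * Mapping.chan`: offset 8, 8 bytes -/
@[vacc] def Mapping.chan (mem : Mem) (p : Nat) : Nat :=
  mem.ptr (p + Off.Mapping.chan)
/-- the address of element `i` of what `Mapping.chan` points to (`MappingChannel`, 3 bytes each) -/
@[vacc] def Mapping.chan_at (mem : Mem) (p i : Nat) : Nat :=
  Mapping.chan mem p + Off.sizeof.MappingChannel * i
/-- the field `uint8 Mapping.submaps`: offset 16, 1 bytes -/
@[vacc] def Mapping.submaps (mem : Mem) (p : Nat) : Nat :=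
  mem.u8 (p + Off.Mapping.submaps)
/-- the field `uint8 Mapping.submap_floor[16]`: offset 17, 16 bytes -/
@[vacc] def Mapping.submap_floor (mem : Mem) (p i : Nat) : Nat :=
  mem.u8 (p + Off.Mapping.submap_floor + i)
/-- the field `uint8 Mapping.submap_residue[16]`: offset 33, 16 bytes -/
@[vacc] def Mapping.submap_residue (mem : Mem) (p i : Nat) : Nat :=
  mem.u8 (p + Off.Mapping.submap_residue + i)

/-! #### `struct Mode` -/
/-- the field `uint8 Mode.blockflag`: offset 0, 1 bytes -/
@[vacc] def Mode.blockflag (mem : Mem) (p : Nat) : Nat :=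
  mem.u8 (p + Off.Mode.blockflag)
/-- the field `uint8 Mode.mapping`: offset 1, 1 bytes -/
@[vacc] def Mode.mapping (mem : Mem) (p : Nat) : Nat :=
  mem.u8 (p + Off.Mode.mapping)
/-- the field `uint16 Mode.windowtype`: offset 2, 2 bytes -/
@[vacc] def Mode.windowtype (mem : Mem) (p : Nat) : Nat :=
  mem.u16 (p + Off.Mode.windowtype)
/-- the field `uint16 Mode.transformtype`: offset 4, 2 bytes -/
@[vacc] def Mode.transformtype (mem : Mem) (p : Nat) : Nat :=
  mem.u16 (p + Off.Mode.transformtype)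

/-! #### `struct ProbedPage` -/
/-- the field `uint32 ProbedPage.page_start`: offset 0, 4 bytes -/
@[vacc] def ProbedPage.page_start (mem : Mem) (p : Nat) : Nat :=
  mem.u32 (p + Off.ProbedPage.page_start)
/-- the field `uint32 ProbedPage.page_end`: offset 4, 4 bytes -/
@[vacc] def ProbedPage.page_end (mem : Mem) (p : Nat) : Nat :=
  mem.u32 (p + Off.ProbedPage.page_end)
/-- the field `uint32 ProbedPage.last_decoded_sample`: offset 8, 4 bytes -/
@[vacc] def ProbedPage.last_decoded_sample (mem : Mem) (p : Nat) : Nat :=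
  mem.u32 (p + Off.ProbedPage.last_decoded_sample)

/-! #### `struct stbv__floor_ordering` -/
/-- the field `uint16 stbv__floor_ordering.x`: offset 0, 2 bytes -/
@[vacc] def stbv__floor_ordering.x (mem : Mem) (p : Nat) : Nat :=
  mem.u16 (p + Off.stbv__floor_ordering.x)
/-- the field `uint16 stbv__floor_ordering.id`: offset 2, 2 bytes -/
@[vacc] def stbv__floor_ordering.id (mem : Mem) (p : Nat) : Nat :=
  mem.u16 (p + Off.stbv__floor_ordering.id)

/-! #### `union bits64` -/
/-- the field `double bits64.d`: offset 0, 8 bytes -/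
@[vacc] def bits64.d (mem : Mem) (p : Nat) : Nat :=
  mem.u64 (p + Off.bits64.d)
/-- the field `u64 bits64.u`: offset 0, 8 bytes -/
@[vacc] def bits64.u (mem : Mem) (p : Nat) : Nat :=
  mem.u64 (p + Off.bits64.u)

/-! #### `struct asan_global` -/
/-- the field `word asan_global.beg`: offset 0, 8 bytes -/
@[vacc] def asan_global.beg (mem : Mem) (p : Nat) : Nat :=
  mem.u64 (p + Off.asan_global.beg)
/-- the field `word asan_global.size`: offset 8, 8 bytes -/
@[vacc] def asan_global.size (mem : Mem) (p : Nat) : Nat :=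
  mem.u64 (p + Off.asan_global.size)
/-- the field `word asan_global.size_with_redzone`: offset 16, 8 bytes -/
@[vacc] def asan_global.size_with_redzone (mem : Mem) (p : Nat) : Nat :=
  mem.u64 (p + Off.asan_global.size_with_redzone)
/-- the field `word asan_global.name`: offset 24, 8 bytes -/
@[vacc] def asan_global.name (mem : Mem) (p : Nat) : Nat :=
  mem.u64 (p + Off.asan_global.name)
/-- the field `word asan_global.module_name`: offset 32, 8 bytes -/
@[vacc] def asan_global.module_name (mem : Mem) (p : Nat) : Nat :=
  mem.u64 (p + Off.asan_global.module_name)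
/-- the field `word asan_global.has_dynamic_init`: offset 40, 8 bytes -/
@[vacc] def asan_global.has_dynamic_init (mem : Mem) (p : Nat) : Nat :=
  mem.u64 (p + Off.asan_global.has_dynamic_init)
/-- the field `word asan_global.location`: offset 48, 8 bytes -/
@[vacc] def asan_global.location (mem : Mem) (p : Nat) : Nat :=
  mem.u64 (p + Off.asan_global.location)
/-- the field `word asan_global.odr_indicator`: offset 56, 8 bytes -/
@[vacc] def asan_global.odr_indicator (mem : Mem) (p : Nat) : Nat :=
  mem.u64 (p + Off.asan_global.odr_indicator)

end Vorbis
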